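-- pv_equiv track=rewrite | github.com/Shab00/codingProblems | balancedAthlete.py | solve
-- ===== SOURCE A (Python) =====
-- from typing import List
--
-- def solve(athletes:List[int]) -> int:
--
--     athletes.sort()
--     results = []
--     for i in range(1, len(athletes)):
--         teama = athletes[:i]
--         teamb = athletes[i:]
--         results.append(min(teamb) - max(teama))
--     return min(results)
-- ===== SOURCE B (Python) =====
-- from typing import List
--
-- def solve(athletes: List[int]) -> int:
--     athletes.sort()
--     return min(b - a for a, b in zip(athletes, athletes[1:]))
-- ===== Notes on version B (the rewrite author's own statement) =====
-- stated objective: faster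
-- what changed: Instead of building every prefix/suffix split and scanning each for its max/min (quadratic), B sorts once and takes the minimum adjacent difference in a single zip pass.
import Mathlib
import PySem

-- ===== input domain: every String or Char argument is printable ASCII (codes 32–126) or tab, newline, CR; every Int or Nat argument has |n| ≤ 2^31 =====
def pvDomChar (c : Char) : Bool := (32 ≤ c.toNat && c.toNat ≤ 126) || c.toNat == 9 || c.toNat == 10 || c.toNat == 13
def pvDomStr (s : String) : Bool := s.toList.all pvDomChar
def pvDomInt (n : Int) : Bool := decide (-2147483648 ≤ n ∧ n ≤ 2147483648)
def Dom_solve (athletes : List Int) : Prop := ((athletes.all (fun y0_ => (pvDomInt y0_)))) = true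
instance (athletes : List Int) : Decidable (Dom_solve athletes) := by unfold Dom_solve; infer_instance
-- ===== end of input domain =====

-- B replaces A's quadratic split-and-scan with one pass over adjacent pairs of the
-- sorted list; return-value equivalence only — both Pythons sort the argument in place.

-- ===== PORT A =====
def solve (athletes : List Int) : Int :=
  let s := PySem.List.sorted athletes (fun x => x)
  let results := (PySem.List.pyRange 1 (s.length : Int) 1).foldl
    (fun acc i =>
      let teama := PySem.List.slice s none (some i)
      let teamb := PySem.List.slice s (some i) none
      acc ++ [(PySem.List.min? teamb (fun x => x)).getD 0
              - (PySem.List.max? teama (fun x => x)).getD 0]) []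
  (PySem.List.min? results (fun x => x)).getD 0

-- ===== PORT B =====
def solve_alt (athletes : List Int) : Int :=
  let s := PySem.List.sorted athletes (fun x => x)
  let diffs := (s.zip (PySem.List.slice s (some 1) none)).map (fun p => p.2 - p.1)
  (PySem.List.min? diffs (fun x => x)).getD 0

-- ===== PRECONDITION & SPEC =====
-- A raises ValueError (min of an empty sequence) on lists of fewer than two athletes.
def Pre_solve (athletes : List Int) : Prop := 2 ≤ athletes.length
instance (athletes : List Int) : Decidable (Pre_solve athletes) := by unfold Pre_solve; infer_instance
def pvWitness_solve : List Int := [3, 1, 7, 4]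

def Spec_solve (athletes : List Int) (out : Int) : Prop := out = solve_alt athletes
instance (athletes : List Int) (out : Int) : Decidable (Spec_solve athletes out) := by unfold Spec_solve; infer_instance

-- ===== CLAIM (what is proved, stated in full; the proofs are below) =====
def Claim_equal_solve : Prop := ∀ (athletes : List Int), Dom_solve athletes → Pre_solve athletes → Spec_solve athletes (solve athletes)

-- ===== LEMMAS AND PROOFS =====

theorem foldl_min_eq_self (t : List Int) (x : Int) (h : ∀ y ∈ t, x ≤ y) :
    t.foldl min x = x := by
  induction t with
  | nil => rfl
  | cons a t ih =>
      simp only [List.foldl_cons]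
      rw [min_eq_left (h a (by simp))]
      exact ih (fun y hy => h y (by simp [hy]))

theorem foldl_max_eq_getLast (t : List Int) (x : Int)
    (h : (x :: t).Pairwise (· ≤ ·)) :
    t.foldl max x = (x :: t).getLast (by simp) := by
  induction t generalizing x with
  | nil => rfl
  | cons a t ih =>
      simp only [List.foldl_cons]
      rw [max_eq_right (List.rel_of_pairwise_cons h (by simp))]
      have := ih a (List.Pairwise.of_cons h)
      simpa using this
  
theorem min_drop_sorted (l : List Int) (hp : l.Pairwise (· ≤ ·)) (k : Nat) (hk : k < l.length) :
    (PySem.List.min? (l.drop k) (fun x => x)).getD 0 = l[k] := by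
  have hd : l.drop k = l[k] :: l.drop (k + 1) := List.drop_eq_getElem_cons hk
  rw [hd, PySem.List.min?_id_cons]
  have hall : ∀ y ∈ l.drop (k + 1), l[k] ≤ y := by
    intro y hy
    obtain ⟨j, hj, rfl⟩ := List.getElem_of_mem hy
    rw [List.getElem_drop]
    have hj' : j < l.length - (k + 1) := by simpa using hj
    exact List.pairwise_iff_getElem.mp hp k (k + 1 + j) (by omega) (by omega) (by omega)
  simp [foldl_min_eq_self _ _ hall]

theorem max_take_sorted (l : List Int) (hp : l.Pairwise (· ≤ ·)) (k : Nat)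
    (hk0 : 0 < k) (hk : k ≤ l.length) :
    (PySem.List.max? (l.take k) (fun x => x)).getD 0 = l[k - 1]'(by omega) := by
  obtain ⟨x, t, hxt⟩ : ∃ x t, l.take k = x :: t := by
    cases h : l.take k with
    | nil => exfalso; have h2 := congrArg List.length h; rw [List.length_take, List.length_nil] at h2; omega
    | cons x t => exact ⟨x, t, rfl⟩
  rw [hxt, PySem.List.max?_id_cons]
  have hpt : (x :: t).Pairwise (· ≤ ·) := hxt ▸ (hp.sublist (List.take_sublist k l))
  rw [foldl_max_eq_getLast t x hpt]
  have hlen : (x :: t).length = k := by rw [← hxt]; simp; omega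
  rw [List.getLast_eq_getElem]
  simp only [Option.getD_some]
  rw [List.getElem_of_eq hxt.symm, List.getElem_take]
  congr 1
  omega

theorem solve_eq (athletes : List Int) (h : 2 ≤ athletes.length) :
    solve athletes = solve_alt athletes := by
  unfold solve solve_alt
  simp only []
  set s := PySem.List.sorted athletes (fun x => x) with hs
  have hp : s.Pairwise (· ≤ ·) := by
    simpa using PySem.List.sorted_pairwise athletes (fun x => x)
  have hlen : s.length = athletes.length := PySem.List.length_sorted ..
  rw [PySem.List.foldl_append_singleton_eq_map, PySem.List.slice_from_one]
  simp only [List.nil_append]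
  have key : (PySem.List.pyRange 1 (s.length : Int) 1).map
        (fun i =>
          (PySem.List.min? (PySem.List.slice s (some i) none) (fun x => x)).getD 0
            - (PySem.List.max? (PySem.List.slice s none (some i)) (fun x => x)).getD 0)
      = (s.zip s.tail).map (fun p => p.2 - p.1) := by
    apply List.ext_getElem
    · simp [PySem.List.length_pyRange_one, List.length_tail]
    · intro k h1 h2
      simp only [List.getElem_map, PySem.List.getElem_pyRange_one]
      have hk : k < s.length - 1 := by
        have := h1; simp [PySem.List.length_pyRange_one] at this; omega
      have h1k : (0:Int) ≤ 1 + (k : Int) := by positivity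
      rw [PySem.List.slice_to s h1k, PySem.List.slice_from s h1k]
      have htn : ((1 : Int) + k).toNat = k + 1 := by omega
      rw [htn]
      rw [min_drop_sorted s hp (k + 1) (by omega), max_take_sorted s hp (k + 1) (by omega) (by omega)]
      simp [List.getElem_zip, List.getElem_tail]
  rw [key]

-- ===== VERDICT (by name: the statement is the Claim_ definition above) =====
theorem solve_spec : Claim_equal_solve := by
  intro athletes _ hpre
  exact solve_eq athletes hpre
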